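-- pv_equiv track=rewrite | github.com/AhmedSolimanEl-mozy/last_modification_on-scanned_page- | consensus_pipeline.py | _strip_commentary
-- ===== SOURCE A (Python) =====
-- def _strip_commentary(text: str) -> str:
--     """Remove common LLM commentary prefixes from the output."""
--     # Remove lines that start with common commentary patterns
--     lines = text.split('\n')
--     cleaned = []
--     skip = True
--     for line in lines:
--         lower = line.strip().lower()
--         if skip and any(lower.startswith(p) for p in
--                         ['here', 'note', 'the reconciled', 'below',
--                          'i have', 'based on', 'after comparing',
--                          'reconciled output', '---']):
--             continue
--         if line.strip():
--             skip = False
--         cleaned.append(line)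
--     return '\n'.join(cleaned)
-- ===== SOURCE B (Python) =====
-- def _strip_commentary(text: str) -> str:
--     """Remove common LLM commentary prefixes from the output."""
--     prefixes = ['here', 'note', 'the reconciled', 'below',
--                 'i have', 'based on', 'after comparing',
--                 'reconciled output', '---']
--
--     def is_commentary(line: str) -> bool:
--         low = line.strip().lower()
--         return any(low.startswith(p) for p in prefixes)
--
--     lines = text.split('\n')
--     # boundary: first non-blank, non-commentary line (len(lines) if none)
--     boundary = len(lines)
--     for i, line in enumerate(lines):
--         if line.strip() and not is_commentary(line):
--             boundary = i
--             break
--     head = [l for l in lines[:boundary] if not is_commentary(l)]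
--     return '\n'.join(head + lines[boundary:])
-- ===== Notes on version B (the rewrite author's own statement) =====
-- stated objective: alternative
-- what changed: Replaces A's skip-flag state machine with a two-phase decomposition: first find the boundary index of the first non-blank non-commentary line, then filter commentary lines out of the prefix and keep the rest wholesale.
import Mathlib
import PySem

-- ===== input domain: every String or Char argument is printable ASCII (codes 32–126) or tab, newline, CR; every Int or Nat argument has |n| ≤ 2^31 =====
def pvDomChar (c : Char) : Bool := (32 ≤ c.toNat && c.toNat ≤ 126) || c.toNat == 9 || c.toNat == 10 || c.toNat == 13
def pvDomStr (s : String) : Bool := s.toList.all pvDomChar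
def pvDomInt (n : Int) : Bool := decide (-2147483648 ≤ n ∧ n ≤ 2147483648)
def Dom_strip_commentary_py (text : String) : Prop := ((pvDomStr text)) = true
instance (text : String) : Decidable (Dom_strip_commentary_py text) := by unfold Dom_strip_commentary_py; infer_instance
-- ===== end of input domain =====

-- B replaces A's skip-flag state machine by a boundary-then-filter two-phase pass (alternative decomposition, same cost).

-- shared literal constant: the commentary prefixes of the Python source
def pvPrefixes : List String :=
  ["here", "note", "the reconciled", "below", "i have", "based on",
   "after comparing", "reconciled output", "---"]

-- lower = line.strip().lower(); any(lower.startswith(p) for p in prefixes) — the commentary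
-- test both sources evaluate (named once so both ports share a transcription of it)
def pvIsCommentary (line : String) : Bool :=
  let low := PySem.Str.lower (PySem.Str.strip line)
  pvPrefixes.any (fun p => PySem.Str.startswith low p)

-- ===== PORT A =====
-- the body of A's for-loop, on state (cleaned, skip)
def pvStepA (st : List String × Bool) (line : String) : List String × Bool :=
  if st.2 && pvIsCommentary line then
    st  -- continue
  else
    (st.1 ++ [line], if PySem.Str.strip line ≠ "" then false else st.2)

-- literal transliteration of A (text.split('\n') = Str.split? with sep "\n" ≠ "", always some)
def strip_commentary_py (text : String) : String :=
  let lines := (PySem.Str.split? text "\n").getD []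
  PySem.Str.join "\n" (lines.foldl pvStepA ([], true)).1

-- ===== PORT B =====

-- Source B: boundary = first index of a non-blank non-commentary line (len(lines) if none;
-- the break-on-first-hit loop is List.findIdx?), then filter the prefix and keep the rest.
def strip_commentary_py_alt (text : String) : String :=
  let lines := (PySem.Str.split? text "\n").getD []
  let boundary := (lines.findIdx?
      (fun line => PySem.Str.strip line ≠ "" && !pvIsCommentary line)).getD lines.length
  -- lines[:boundary] / lines[boundary:] with 0 ≤ boundary ≤ len(lines): exact as take/drop
  let head := (lines.take boundary).filter (fun l => !pvIsCommentary l)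
  PySem.Str.join "\n" (head ++ lines.drop boundary)

-- ===== PRECONDITION & SPEC =====
def Spec_strip_commentary_py (text : String) (out : String) : Prop := out = strip_commentary_py_alt text
instance (text : String) (out : String) : Decidable (Spec_strip_commentary_py text out) := by unfold Spec_strip_commentary_py; infer_instance

-- ===== CLAIM (what is proved, stated in full; the proofs are below) =====
def Claim_equal_strip_commentary_py : Prop := ∀ (text : String), Dom_strip_commentary_py text → Spec_strip_commentary_py text (strip_commentary_py text)

-- ===== LEMMAS AND PROOFS =====

-- the common recursive characterization of the kept lines
def pvCore : List String → List String
  | [] => []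
  | l :: ls =>
      if pvIsCommentary l then pvCore ls
      else if PySem.Str.strip l ≠ "" then l :: ls
      else l :: pvCore ls

lemma pvFoldA_false (ls : List String) (acc : List String) :
    ls.foldl pvStepA (acc, false) = (acc ++ ls, false) := by
  induction ls generalizing acc with
  | nil => simp
  | cons l ls ih =>
      simp only [List.foldl_cons, pvStepA, Bool.false_and, Bool.false_eq_true, if_false,
        ite_self]
      rw [ih]
      simp

lemma pvFoldA_true (ls : List String) (acc : List String) :
    (ls.foldl pvStepA (acc, true)).1 = acc ++ pvCore ls := by
  induction ls generalizing acc with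
  | nil => simp [pvCore]
  | cons l ls ih =>
      simp only [List.foldl_cons]
      by_cases hc : pvIsCommentary l
      · have : pvStepA (acc, true) l = (acc, true) := by
          simp [pvStepA, hc]
        rw [this, ih, pvCore, if_pos hc]
      · have hstep : pvStepA (acc, true) l =
            (acc ++ [l], if PySem.Str.strip l ≠ "" then false else true) := by
          simp [pvStepA, hc]
        rw [hstep]
        by_cases hs : PySem.Str.strip l ≠ ""
        · rw [if_pos hs, pvFoldA_false]
          simp [pvCore, if_neg hc, if_pos hs]
        · rw [if_neg hs, ih]
          simp [pvCore, if_neg hc, if_neg hs]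

lemma pvB_core (ls : List String) :
    ((ls.take ((ls.findIdx?
        (fun line => PySem.Str.strip line ≠ "" && !pvIsCommentary line)).getD ls.length)).filter
      (fun l => !pvIsCommentary l)) ++
      ls.drop ((ls.findIdx?
        (fun line => PySem.Str.strip line ≠ "" && !pvIsCommentary line)).getD ls.length)
    = pvCore ls := by
  induction ls with
  | nil => simp [pvCore]
  | cons l ls ih =>
      rw [List.findIdx?_cons]
      by_cases hp : (decide (PySem.Str.strip l ≠ "") && !pvIsCommentary l) = true
      · rw [if_pos hp]
        simp only [Option.getD_some, List.take_zero, List.drop_zero, List.filter_nil,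
          List.nil_append]
        simp only [Bool.and_eq_true, Bool.not_eq_eq_eq_not, Bool.not_true, decide_eq_true_eq] at hp
        rw [pvCore, if_neg (by simp [hp.2]), if_pos hp.1]
      · rw [if_neg hp]
        have hb : ((ls.findIdx?
              (fun line => PySem.Str.strip line ≠ "" && !pvIsCommentary line)).map (· + 1)).getD
              (l :: ls).length
            = ((ls.findIdx?
              (fun line => PySem.Str.strip line ≠ "" && !pvIsCommentary line)).getD ls.length) + 1 := by
          cases ls.findIdx? (fun line => PySem.Str.strip line ≠ "" && !pvIsCommentary line) <;> simp
        rw [hb, List.take_succ_cons, List.drop_succ_cons, List.filter_cons]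
        by_cases hc : pvIsCommentary l
        · rw [pvCore, if_pos hc]
          simpa [hc] using ih
        · have hs : ¬ PySem.Str.strip l ≠ "" := by
            simp only [Bool.and_eq_true, Bool.not_eq_eq_eq_not, Bool.not_true,
              decide_eq_true_eq, not_and] at hp
            intro h
            exact hc (by simpa using hp h)
          rw [pvCore, if_neg hc, if_neg hs]
          simpa [hc] using congrArg (l :: ·) ih

lemma pvMain (lines : List String) :
    PySem.Str.join "\n" (lines.foldl pvStepA ([], true)).1
    = PySem.Str.join "\n"
        ((lines.take ((lines.findIdx?
            (fun line => PySem.Str.strip line ≠ "" && !pvIsCommentary line)).getD lines.length)).filter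
          (fun l => !pvIsCommentary l) ++
         lines.drop ((lines.findIdx?
            (fun line => PySem.Str.strip line ≠ "" && !pvIsCommentary line)).getD lines.length)) := by
  rw [pvFoldA_true, pvB_core]
  simp

-- ===== VERDICT (by name: the statement is the Claim_ definition above) =====
theorem strip_commentary_py_spec : Claim_equal_strip_commentary_py := by
  intro text _
  exact pvMain ((PySem.Str.split? text "\n").getD [])
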